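-- pv_equiv track=rewrite | github.com/iacchus/i3-stuff | move-window-prev-next-workspace.py | get_next_empty_workspace
-- ===== SOURCE A (Python) =====
-- def get_next_empty_workspace(workspaces: list[int]):
--     first = 1
--     chosen = 0
--     for number in range(first, 11):
--         if number not in workspaces:
--             chosen = number
--             break
--     return chosen
-- ===== SOURCE B (Python) =====
-- def get_next_empty_workspace(workspaces: list[int]):
--     missing = set(range(1, 11)) - set(workspaces)
--     return min(missing) if missing else 0
-- ===== Notes on version B (the rewrite author's own statement) =====
-- stated objective: simpler
-- what changed: Replaces the ordered scan-with-break over 1..10 by building the set difference set(range(1,11)) - set(workspaces) and taking its minimum (0 when empty).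
import Mathlib
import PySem

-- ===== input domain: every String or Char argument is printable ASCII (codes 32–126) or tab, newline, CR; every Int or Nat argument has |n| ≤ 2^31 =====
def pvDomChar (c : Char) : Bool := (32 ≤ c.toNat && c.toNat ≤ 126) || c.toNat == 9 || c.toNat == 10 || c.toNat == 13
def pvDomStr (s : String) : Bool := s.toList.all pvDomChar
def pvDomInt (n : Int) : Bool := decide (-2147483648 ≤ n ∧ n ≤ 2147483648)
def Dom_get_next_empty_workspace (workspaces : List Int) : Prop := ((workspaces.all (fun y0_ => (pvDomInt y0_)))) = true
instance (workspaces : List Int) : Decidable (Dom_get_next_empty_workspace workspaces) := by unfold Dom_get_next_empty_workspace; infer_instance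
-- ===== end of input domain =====

-- B replaces A's scan-with-break over 1..10 by a set difference (filter of the candidates) plus min, 0 when empty; objective: simpler.


-- ===== PORT A =====
-- A's for-loop with break: return the first number of the range not in workspaces, else the initial chosen = 0
def pvLoopA (workspaces : List Int) : List Int → Int
  | [] => 0
  | n :: rest => if workspaces.contains n then pvLoopA workspaces rest else n

def get_next_empty_workspace (workspaces : List Int) : Int :=
  pvLoopA workspaces (PySem.List.pyRange 1 11 1)

-- ===== PORT B =====
-- set(range(1,11)) - set(workspaces): range(1,11) is duplicate-free, so the set
-- difference is exactly the filter of the range list; min(missing) via PySem.List.min?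
def get_next_empty_workspace_alt (workspaces : List Int) : Int :=
  let missing := (PySem.List.pyRange 1 11 1).filter (fun n => !workspaces.contains n)
  match PySem.List.min? missing (fun x => x) with
  | some m => m
  | none => 0

-- ===== PRECONDITION & SPEC =====
def Spec_get_next_empty_workspace (workspaces : List Int) (out : Int) : Prop := out = get_next_empty_workspace_alt workspaces
instance (workspaces : List Int) (out : Int) : Decidable (Spec_get_next_empty_workspace workspaces out) := by unfold Spec_get_next_empty_workspace; infer_instance

-- ===== CLAIM (what is proved, stated in full; the proofs are below) =====
def Claim_equal_get_next_empty_workspace : Prop := ∀ (workspaces : List Int), Dom_get_next_empty_workspace workspaces → Spec_get_next_empty_workspace workspaces (get_next_empty_workspace workspaces)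

-- ===== LEMMAS AND PROOFS =====

theorem pvFoldl_min_of_le (t : List Int) : ∀ x : Int, (∀ y ∈ t, x ≤ y) → t.foldl min x = x := by
  induction t with
  | nil => intro x _; rfl
  | cons a t ih =>
    intro x h
    simp only [List.foldl_cons]
    have hax : min x a = x := min_eq_left (h a (by simp))
    rw [hax]
    exact ih x (fun y hy => h y (by simp [hy]))

-- on a strictly sorted candidate list, A's first-miss loop equals min-of-filter (0 if none)
theorem pvLoop_eq_min (workspaces : List Int) (l : List Int) (hs : l.Pairwise (· < ·)) :
    pvLoopA workspaces l =
      (match PySem.List.min? (l.filter (fun n => !workspaces.contains n)) (fun x => x) with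
       | some m => m
       | none => 0) := by
  induction l with
  | nil => rfl
  | cons n rest ih =>
    have hs' := (List.pairwise_cons.mp hs).2
    have hlt := (List.pairwise_cons.mp hs).1
    by_cases h : n ∈ workspaces
    · simpa [pvLoopA, List.filter_cons, h] using ih hs'
    · have key : (rest.filter (fun n => !decide (n ∈ workspaces))).foldl min n = n := by
        apply pvFoldl_min_of_le
        intro y hy
        exact le_of_lt (hlt y (List.mem_of_mem_filter hy))
      simp [pvLoopA, h, PySem.List.min?_id_cons, key]

-- ===== VERDICT (by name: the statement is the Claim_ definition above) =====
theorem get_next_empty_workspace_spec : Claim_equal_get_next_empty_workspace := by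
  intro workspaces _
  unfold Spec_get_next_empty_workspace get_next_empty_workspace get_next_empty_workspace_alt
  exact pvLoop_eq_min workspaces _ (PySem.List.pairwise_lt_pyRange_one 1 11)
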